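-- pv_equiv track=rewrite | github.com/JoaoBraveCoding/HashCode2019 | hashcode/src/main.py | compare_slides
-- ===== SOURCE A (Python) =====
-- def compare_slides(s1, s2):  # tags for p1 and p2
--     t1 = s1[1]
--     t2 = s2[1]
--     common = 0
--     t1NotInT2 = 0
--     t2NotInT1 = 0
--     for el1 in t1:
--         tempResult = aux_compare(el1, t2)
--         if tempResult == 1:
--             common += 1
--         else:
--             t1NotInT2 += 1
--
--     for el2 in t2:
--         tempResult = aux_compare(el2, t1)
--         if tempResult == 1:
--             common += 1
--         else:
--             t2NotInT1 += 1
--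
--     return min(common, t1NotInT2, t2NotInT1)
--
-- def aux_compare(el, t2):
--     for el2 in t2:
--         if el == el2:
--             return 1
--     return 0
-- ===== SOURCE B (Python) =====
-- def compare_slides(s1, s2):
--     # Sort both tag lists, then one merge pass over the two sorted lists:
--     # equal heads consume the whole run of that value from both sides (all those
--     # occurrences are "common"); a smaller head is exclusive to its side.
--     t1 = sorted(s1[1])
--     t2 = sorted(s2[1])
--     n, m = len(t1), len(t2)
--     i = j = 0
--     common = only1 = only2 = 0
--     while i < n and j < m:
--         if t1[i] == t2[j]:
--             v = t1[i]
--             i += 1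
--             j += 1
--             c = 2
--             while i < n and t1[i] == v:
--                 i += 1
--                 c += 1
--             while j < m and t2[j] == v:
--                 j += 1
--                 c += 1
--             common += c
--         elif t1[i] < t2[j]:
--             only1 += 1
--             i += 1
--         else:
--             only2 += 1
--             j += 1
--     only1 += n - i
--     only2 += m - j
--     return min(common, only1, only2)
-- ===== Notes on version B (the rewrite author's own statement) =====
-- stated objective: alternative
-- what changed: Replaces A's two nested membership-scan loops by sort-then-merge: both tag lists are sorted and a single two-pointer merge pass consumes equal runs to count common occurrences and smaller heads to count each side's exclusive tags.
import Mathlib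
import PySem

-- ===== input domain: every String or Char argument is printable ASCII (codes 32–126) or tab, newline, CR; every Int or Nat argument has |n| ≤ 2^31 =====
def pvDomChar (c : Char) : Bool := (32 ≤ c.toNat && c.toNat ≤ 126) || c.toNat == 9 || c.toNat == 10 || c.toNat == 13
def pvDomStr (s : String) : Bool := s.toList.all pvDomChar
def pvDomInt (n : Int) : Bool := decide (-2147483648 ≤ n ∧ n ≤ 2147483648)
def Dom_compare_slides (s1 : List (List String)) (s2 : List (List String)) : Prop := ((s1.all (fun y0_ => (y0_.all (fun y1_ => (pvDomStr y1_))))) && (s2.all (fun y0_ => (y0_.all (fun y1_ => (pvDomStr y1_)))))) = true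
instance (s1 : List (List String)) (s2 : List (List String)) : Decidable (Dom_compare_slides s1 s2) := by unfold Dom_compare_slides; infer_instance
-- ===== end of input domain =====

-- B replaces A's nested membership-scan loops by sort-then-merge: sort both tag
-- lists, then one two-pointer merge pass counts common runs and exclusive tags.

-- ===== PORT A =====
def aux_compare (el : String) (t2 : List String) : Int :=
  match t2 with
  | [] => 0
  | el2 :: rest => if el == el2 then 1 else aux_compare el rest

def compare_slides (s1 : List (List String)) (s2 : List (List String)) : Int :=
  let t1 := (PySem.List.pyGet? s1 1).getD []
  let t2 := (PySem.List.pyGet? s2 1).getD []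
  let r1 := t1.foldl (fun (acc : Int × Int) el1 =>
      if aux_compare el1 t2 == 1 then (acc.1 + 1, acc.2) else (acc.1, acc.2 + 1)) (0, 0)
  let r2 := t2.foldl (fun (acc : Int × Int) el2 =>
      if aux_compare el2 t1 == 1 then (acc.1 + 1, acc.2) else (acc.1, acc.2 + 1)) (r1.1, 0)
  min (min r2.1 r1.2) r2.2

-- ===== PORT B =====
-- the inner run-consuming while loops of Source B: count and drop the leading run of v
def popRun (v : String) : List String → Int × List String
  | [] => (0, [])
  | x :: xs =>
    if x == v then
      let p := popRun v xs
      (p.1 + 1, p.2)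
    else (0, x :: xs)

lemma popRun_len_le (v : String) (l : List String) : (popRun v l).2.length ≤ l.length := by
  induction l with
  | nil => simp [popRun]
  | cons x xs ih =>
    by_cases h : (x == v) = true
    · simp only [popRun, h, if_true]
      exact Nat.le_succ_of_le ih
    · simp [popRun, h]

-- the outer two-pointer while loop of Source B, as structural recursion on the suffixes
def mergeCount : List String → List String → Int × Int × Int
  | [], ys => (0, 0, (ys.length : Int))
  | x :: xs, [] => (0, (xs.length : Int) + 1, 0)
  | x :: xs, y :: ys =>
    if x == y then
      let r := mergeCount (popRun x xs).2 (popRun x ys).2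
      (r.1 + ((popRun x xs).1 + 1) + ((popRun x ys).1 + 1), r.2.1, r.2.2)
    else if x < y then
      let r := mergeCount xs (y :: ys)
      (r.1, r.2.1 + 1, r.2.2)
    else
      let r := mergeCount (x :: xs) ys
      (r.1, r.2.1, r.2.2 + 1)
termination_by xs ys => xs.length + ys.length
decreasing_by
  · have h1 := popRun_len_le x xs
    have h2 := popRun_len_le x ys
    simp only [List.length_cons]; omega
  · simp only [List.length_cons]; omega
  · simp only [List.length_cons]; omega

def compare_slides_alt (s1 : List (List String)) (s2 : List (List String)) : Int :=
  let t1 := PySem.List.sorted ((PySem.List.pyGet? s1 1).getD []) (fun x => x) false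
  let t2 := PySem.List.sorted ((PySem.List.pyGet? s2 1).getD []) (fun x => x) false
  let r := mergeCount t1 t2
  min (min r.1 r.2.1) r.2.2

-- ===== PRECONDITION & SPEC =====
-- Pre_ excludes exactly the inputs where Python A raises IndexError (s1[1] or s2[1] missing).
def Pre_compare_slides (s1 : List (List String)) (s2 : List (List String)) : Prop :=
  2 ≤ s1.length ∧ 2 ≤ s2.length
instance (s1 : List (List String)) (s2 : List (List String)) : Decidable (Pre_compare_slides s1 s2) := by unfold Pre_compare_slides; infer_instance

def pvWitness_compare_slides : List (List String) × List (List String) :=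
  ([["p1"], ["cat", "dog"]], [["p2"], ["dog", "sun"]])

def Spec_compare_slides (s1 : List (List String)) (s2 : List (List String)) (out : Int) : Prop := out = compare_slides_alt s1 s2
instance (s1 : List (List String)) (s2 : List (List String)) (out : Int) : Decidable (Spec_compare_slides s1 s2 out) := by unfold Spec_compare_slides; infer_instance

-- ===== CLAIM (what is proved, stated in full; the proofs are below) =====
def Claim_equal_compare_slides : Prop := ∀ (s1 : List (List String)) (s2 : List (List String)), Dom_compare_slides s1 s2 → Pre_compare_slides s1 s2 → Spec_compare_slides s1 s2 (compare_slides s1 s2)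

-- ===== LEMMAS AND PROOFS =====

lemma aux_compare_eq (el : String) (t : List String) :
    aux_compare el t = if el ∈ t then 1 else 0 := by
  induction t with
  | nil => simp [aux_compare]
  | cons y ys ih =>
    by_cases h : el = y
    · simp [aux_compare, h]
    · simp [aux_compare, h, ih]

-- A's scan-and-branch loop computes (init + #hits, init + #misses).
lemma A_loop (t : List String) (l : List String) (c d : Int) :
    l.foldl (fun (acc : Int × Int) e =>
        if aux_compare e t == 1 then (acc.1 + 1, acc.2) else (acc.1, acc.2 + 1)) (c, d)
      = (c + (l.countP (fun e => decide (e ∈ t)) : Int),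
         d + ((l.length : Int) - (l.countP (fun e => decide (e ∈ t)) : Int))) := by
  induction l generalizing c d with
  | nil => simp
  | cons x xs ih =>
    rw [List.foldl_cons]
    by_cases h : x ∈ t
    · have hs : (if (aux_compare x t == 1) = true then ((c : Int) + 1, (d : Int))
          else (c, d + 1)) = (c + 1, d) := by simp [aux_compare_eq, h]
      rw [hs, ih]
      refine Prod.ext ?_ ?_ <;>
        · simp only [List.countP_cons, List.length_cons, h, decide_true, if_true]
          push_cast; ring
    · have hs : (if (aux_compare x t == 1) = true then ((c : Int) + 1, (d : Int))
          else (c, d + 1)) = (c, d + 1) := by simp [aux_compare_eq, h]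
      rw [hs, ih]
      refine Prod.ext ?_ ?_ <;>
        · simp only [List.countP_cons, List.length_cons, h, decide_false]
          push_cast; ring

-- popRun splits off the maximal leading run of v; on a sorted list with v below
-- every element, the rest is strictly above v.
lemma popRun_split (v : String) (l : List String)
    (hs : l.Pairwise (· ≤ ·)) (hge : ∀ e ∈ l, v ≤ e) :
    ∃ (k : Nat) (r : List String), popRun v l = ((k : Int), r) ∧
      l = List.replicate k v ++ r ∧ (∀ e ∈ r, v < e) ∧ r.Pairwise (· ≤ ·) := by
  induction l with
  | nil => exact ⟨0, [], by simp [popRun], by simp, by simp, List.Pairwise.nil⟩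
  | cons x xs ih =>
    by_cases h : x = v
    · subst h
      obtain ⟨k, r, hpop, hsplit, hr, hrs⟩ := ih hs.of_cons
        (fun e he => le_trans (hge x (by simp)) (List.rel_of_pairwise_cons hs he))
      refine ⟨k + 1, r, ?_, ?_, hr, hrs⟩
      · simp [popRun, hpop]
      · simpa [List.replicate_succ] using hsplit
    · have hbeq : (x == v) = false := by simp [h]
      have hvx : v < x := lt_of_le_of_ne (hge x (by simp)) (fun hh => h hh.symm)
      refine ⟨0, x :: xs, by simp [popRun, hbeq], by simp, ?_, hs⟩
      intro e he
      rcases List.mem_cons.mp he with rfl | he'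
      · exact hvx
      · exact lt_of_lt_of_le hvx (List.rel_of_pairwise_cons hs he')


-- On sorted lists the merge pass computes (#hits₁ + #hits₂, #miss₁, #miss₂).
lemma mergeCount_spec : ∀ (a b : List String),
    a.Pairwise (· ≤ ·) → b.Pairwise (· ≤ ·) →
    mergeCount a b =
      ((a.countP (fun e => decide (e ∈ b)) : Int) + (b.countP (fun e => decide (e ∈ a)) : Int),
       (a.length : Int) - (a.countP (fun e => decide (e ∈ b)) : Int),
       (b.length : Int) - (b.countP (fun e => decide (e ∈ a)) : Int)) := by
  intro a b
  induction a, b using mergeCount.induct with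
  | case1 ys =>
    intro _ _
    simp [mergeCount]
  | case2 x xs =>
    intro _ _
    simp [mergeCount]
  | case3 x xs y ys hxy ih =>
    intro ha hb
    have hx : x = y := by simpa using hxy
    subst hx
    obtain ⟨k1, r1, hp1, hsp1, hgt1, hs1⟩ := popRun_split x xs ha.of_cons
      (fun e he => List.rel_of_pairwise_cons ha he)
    obtain ⟨k2, r2, hp2, hsp2, hgt2, hs2⟩ := popRun_split x ys hb.of_cons
      (fun e he => List.rel_of_pairwise_cons hb he)
    rw [hp1, hp2] at ih
    have ihe := ih hs1 hs2
    have hm1 : ∀ e ∈ r1, ((e ∈ x :: ys) ↔ (e ∈ r2)) := by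
      intro e he
      have hne : e ≠ x := ne_of_gt (hgt1 e he)
      constructor
      · intro h
        rcases List.mem_cons.mp h with rfl | h'
        · exact absurd rfl hne
        · rw [hsp2] at h'
          rcases List.mem_append.mp h' with h'' | h''
          · exact absurd (List.eq_of_mem_replicate h'') hne
          · exact h''
      · intro h
        exact List.mem_cons_of_mem _ (hsp2 ▸ List.mem_append_right _ h)
    have hm2 : ∀ e ∈ r2, ((e ∈ x :: xs) ↔ (e ∈ r1)) := by
      intro e he
      have hne : e ≠ x := ne_of_gt (hgt2 e he)
      constructor
      · intro h
        rcases List.mem_cons.mp h with rfl | h'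
        · exact absurd rfl hne
        · rw [hsp1] at h'
          rcases List.mem_append.mp h' with h'' | h''
          · exact absurd (List.eq_of_mem_replicate h'') hne
          · exact h''
      · intro h
        exact List.mem_cons_of_mem _ (hsp1 ▸ List.mem_append_right _ h)
    have hq1 : r1.countP (fun e => decide (e ∈ x :: ys))
        = r1.countP (fun e => decide (e ∈ r2)) :=
      List.countP_congr (fun e he => by
        rw [decide_eq_true_iff, decide_eq_true_iff]; exact hm1 e he)
    have hq2 : r2.countP (fun e => decide (e ∈ x :: xs))
        = r2.countP (fun e => decide (e ∈ r1)) :=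
      List.countP_congr (fun e he => by
        rw [decide_eq_true_iff, decide_eq_true_iff]; exact hm2 e he)
    have hc1 : (x :: xs).countP (fun e => decide (e ∈ x :: ys))
        = (k1 + 1) + r1.countP (fun e => decide (e ∈ r2)) := by
      rw [List.countP_cons]
      conv_lhs => rw [hsp1]
      rw [List.countP_append, List.countP_replicate, hq1]
      simp
      omega
    have hc2 : (x :: ys).countP (fun e => decide (e ∈ x :: xs))
        = (k2 + 1) + r2.countP (fun e => decide (e ∈ r1)) := by
      rw [List.countP_cons]
      conv_lhs => rw [hsp2]
      rw [List.countP_append, List.countP_replicate, hq2]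
      simp
      omega
    have hl1 : (x :: xs).length = (k1 + 1) + r1.length := by
      rw [List.length_cons, hsp1]
      simp
      omega
    have hl2 : (x :: ys).length = (k2 + 1) + r2.length := by
      rw [List.length_cons, hsp2]
      simp
      omega
    simp only [mergeCount, beq_self_eq_true, if_true, hp1, hp2]
    rw [ihe, hc1, hc2, hl1, hl2]
    refine Prod.ext ?_ (Prod.ext ?_ ?_) <;> (dsimp only; push_cast; ring)
  | case4 x xs y ys hxy hlt ih =>
    intro ha hb
    have ihe := ih ha.of_cons hb
    have hgt : ∀ e ∈ y :: ys, x < e := by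
      intro e he
      rcases List.mem_cons.mp he with rfl | h'
      · exact hlt
      · exact lt_of_lt_of_le hlt (List.rel_of_pairwise_cons hb h')
    have hxnb : x ∉ y :: ys := fun h => lt_irrefl x (hgt x h)
    have hc1 : (x :: xs).countP (fun e => decide (e ∈ y :: ys))
        = xs.countP (fun e => decide (e ∈ y :: ys)) := by
      rw [List.countP_cons]
      simp [hxnb]
    have hc2 : (y :: ys).countP (fun e => decide (e ∈ x :: xs))
        = (y :: ys).countP (fun e => decide (e ∈ xs)) :=
      List.countP_congr (fun e he => by
        have hne : e ≠ x := ne_of_gt (hgt e he)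
        simp [hne])
    simp only [mergeCount, hxy, hlt, if_true]
    rw [ihe, hc1, hc2, List.length_cons (as := xs)]
    refine Prod.ext ?_ (Prod.ext ?_ ?_) <;> (dsimp only; push_cast; ring)
  | case5 x xs y ys hxy hlt ih =>
    intro ha hb
    have ihe := ih ha hb.of_cons
    have hyx : y < x := lt_of_le_of_ne (not_lt.mp hlt)
      (fun h => hxy (by simp [h.symm]))
    have hgt : ∀ e ∈ x :: xs, y < e := by
      intro e he
      rcases List.mem_cons.mp he with rfl | h'
      · exact hyx
      · exact lt_of_lt_of_le hyx (List.rel_of_pairwise_cons ha h')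
    have hynb : y ∉ x :: xs := fun h => lt_irrefl y (hgt y h)
    have hc2 : (y :: ys).countP (fun e => decide (e ∈ x :: xs))
        = ys.countP (fun e => decide (e ∈ x :: xs)) := by
      rw [List.countP_cons]
      simp [hynb]
    have hc1 : (x :: xs).countP (fun e => decide (e ∈ y :: ys))
        = (x :: xs).countP (fun e => decide (e ∈ ys)) :=
      List.countP_congr (fun e he => by
        have hne : e ≠ y := ne_of_gt (hgt e he)
        simp [hne])
    simp only [mergeCount, hxy, hlt, if_false]
    rw [ihe, hc2, hc1, List.length_cons (as := ys)]
    refine Prod.ext ?_ (Prod.ext ?_ ?_) <;> (dsimp only; push_cast; ring)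

-- Sorting changes neither lengths, nor memberships, nor the two hit counts.
lemma sorted_count_mem (u v : List String) :
    (PySem.List.sorted u (fun x => x) false).countP
        (fun e => decide (e ∈ PySem.List.sorted v (fun x => x) false))
      = u.countP (fun e => decide (e ∈ v)) := by
  rw [(PySem.List.sorted_perm u (fun x => x) false).countP_eq]
  exact List.countP_congr (fun e _ => by simp [PySem.List.mem_sorted])

-- ===== VERDICT (by name: the statement is the Claim_ definition above) =====
theorem compare_slides_spec : Claim_equal_compare_slides := by
  intro s1 s2 _ _
  unfold Spec_compare_slides compare_slides compare_slides_alt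
  have hmc := mergeCount_spec
    (PySem.List.sorted ((PySem.List.pyGet? s1 1).getD []) (fun x => x) false)
    (PySem.List.sorted ((PySem.List.pyGet? s2 1).getD []) (fun x => x) false)
    (by simpa using PySem.List.sorted_pairwise ((PySem.List.pyGet? s1 1).getD []) (fun x => x))
    (by simpa using PySem.List.sorted_pairwise ((PySem.List.pyGet? s2 1).getD []) (fun x => x))
  simp only [A_loop, hmc, sorted_count_mem,
    (PySem.List.sorted_perm _ (fun x => x) false).length_eq]
  simp
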